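-- pv_equiv track=rewrite | github.com/anand3eight/CampusCodeVault | Sem 4/ADS Lab/Week9/2.py | derangement
-- ===== SOURCE A (Python) =====
-- def heapify(ls, n, i) :
--     b = i
--     l = 2*i+1
--     r = l + 1
--     if(l < n and ls[b] < ls[l]) :
--         b = l
--     if(r < n and ls[b] < ls[r]) :
--         b = r
--     if(b != i) :
--         ls[b], ls[i] = ls[i], ls[b]
--         heapify(ls, n, b)
--
-- def maxHeap(ls) :
--     n = len(ls)
--     start = n//2 - 1
--     stop = -1
--     step = -1
--     for i in range(start, stop, step) :
--         heapify(ls, n, i)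
--     return ls
--
-- def derangement(ls) :
--     n = len(ls)
--     maxh = list()
--     for i in ls :
--         maxh.append(i)
--     derangeSequence = []
--     for i in range(n) :
--         maxh = maxHeap(maxh)
--         d = maxh[0]
--         del maxh[0]
--         if(i == n-1 or d != ls[i]) :
--             derangeSequence.append(d)
--         else :
--             maxh = maxHeap(maxh)
--             derangeSequence.append(maxh[0])
--             del maxh[0]
--             maxh.append(d)
--
--     if ls[n-1] == derangeSequence[n-1] :
--         derangeSequence[n-1], derangeSequence[n-2] = derangeSequence[n-2], derangeSequence[n-1]
--     return derangeSequence
-- ===== SOURCE B (Python) =====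
-- def derangement(ls):
--     # One descending sort, then a single pass with two cursors into the sorted
--     # list: j points at the current maximum, k at the next untaken element.
--     n = len(ls)
--     s = sorted(ls, reverse=True)
--     out = []
--     j, k = 0, 1
--     for i in range(n):
--         d = s[j]
--         if i == n - 1 or d != ls[i]:
--             out.append(d)
--             j = k
--             k += 1
--         else:
--             out.append(s[k])
--             k += 1
--     if n > 1 and ls[-1] == out[-1]:
--         out[-1], out[-2] = out[-2], out[-1]
--     return out
-- ===== Notes on version B (the rewrite author's own statement) =====
-- stated objective: faster
-- what changed: A rebuilds a max-heap over the remaining pool on every iteration to extract the current (or second) maximum; B sorts the list descending once and then walks it with two cursors (current-max pointer and next-untaken pointer) in a single O(n) pass.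
import Mathlib
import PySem

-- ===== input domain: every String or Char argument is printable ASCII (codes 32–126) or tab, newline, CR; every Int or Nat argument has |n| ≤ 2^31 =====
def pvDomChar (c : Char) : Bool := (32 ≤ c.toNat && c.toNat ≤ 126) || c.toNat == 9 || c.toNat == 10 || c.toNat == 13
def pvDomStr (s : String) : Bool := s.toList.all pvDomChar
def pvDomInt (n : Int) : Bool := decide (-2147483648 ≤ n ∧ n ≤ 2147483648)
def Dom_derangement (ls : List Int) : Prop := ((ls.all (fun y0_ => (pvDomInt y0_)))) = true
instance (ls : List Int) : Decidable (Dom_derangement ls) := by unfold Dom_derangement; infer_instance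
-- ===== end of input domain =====

-- B replaces A's per-iteration heap rebuild by ONE descending sort and two cursors (faster); equivalence of RETURN values (A mutates nothing the caller keeps).

-- ===== PORT A =====
-- exact on Pre_ (ls ≠ []): every index taken (ls[i], maxh[0], del maxh[0], seq[n-1], seq[n-2])
-- is then in range, so List.getD / List.drop / List.set match Python exactly (for n = 1,
-- Python's seq[n-2] = seq[-1] is its only element, matched by Nat n-2 = 0).
-- 'fuel' only bounds the recursion depth (each recursive call strictly increases i < n,
-- so depth ≤ n - i; every call below passes fuel = n): it never changes the value.
def heapify (fuel : Nat) (ls : List Int) (n i : Nat) : List Int :=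
  match fuel with
  | 0 => ls
  | fuel + 1 =>
    let l := 2 * i + 1
    let r := l + 1
    let b1 := if l < n ∧ ls.getD i 0 < ls.getD l 0 then l else i
    let b := if r < n ∧ ls.getD b1 0 < ls.getD r 0 then r else b1
    if b ≠ i then heapify fuel ((ls.set b (ls.getD i 0)).set i (ls.getD b 0)) n b
    else ls

def maxHeap (ls : List Int) : List Int :=
  let n := ls.length
  (PySem.List.pyRange (PySem.Int.floordiv (n : Int) 2 - 1) (-1) (-1)).foldl
    (fun a i => heapify n a n i.toNat) ls

def derangeStepA (ls : List Int) (n : Nat) (st : List Int × List Int) (i : Nat) :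
    List Int × List Int :=
  let seq := st.1
  let maxh := maxHeap st.2
  let d := maxh.getD 0 0
  let maxh := maxh.drop 1
  if i = n - 1 ∨ d ≠ ls.getD i 0 then (seq ++ [d], maxh)
  else
    let maxh2 := maxHeap maxh
    (seq ++ [maxh2.getD 0 0], maxh2.drop 1 ++ [d])

def derangement (ls : List Int) : List Int :=
  let n := ls.length
  let maxh := ls.foldl (fun a x => a ++ [x]) []
  let st := (List.range n).foldl (derangeStepA ls n) ([], maxh)
  let seq := st.1
  if ls.getD (n - 1) 0 = seq.getD (n - 1) 0 then
    (seq.set (n - 1) (seq.getD (n - 2) 0)).set (n - 2) (seq.getD (n - 1) 0)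
  else seq

-- ===== PORT B =====
def derangeStepB (ls s : List Int) (n : Nat) (st : List Int × Nat × Nat) (i : Nat) :
    List Int × Nat × Nat :=
  let out := st.1
  let j := st.2.1
  let k := st.2.2
  let d := s.getD j 0
  if i = n - 1 ∨ d ≠ ls.getD i 0 then (out ++ [d], k, k + 1)
  else (out ++ [s.getD k 0], j, k + 1)

def derangement_alt (ls : List Int) : List Int :=
  let n := ls.length
  let s := PySem.List.sorted ls (fun x => x) true
  let st := (List.range n).foldl (derangeStepB ls s n) ([], 0, 1)
  let out := st.1
  if n > 1 ∧ ls.getD (n - 1) 0 = out.getD (n - 1) 0 then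
    (out.set (n - 1) (out.getD (n - 2) 0)).set (n - 2) (out.getD (n - 1) 0)
  else out

-- ===== PRECONDITION & SPEC =====
-- Python A raises IndexError on the empty list (ls[n-1] with n = 0); on every other list it returns.
def Pre_derangement (ls : List Int) : Prop := ls ≠ []
instance (ls : List Int) : Decidable (Pre_derangement ls) := by unfold Pre_derangement; infer_instance
def pvWitness_derangement : List Int := [3, 1, 2]

def Spec_derangement (ls : List Int) (out : List Int) : Prop := out = derangement_alt ls
instance (ls : List Int) (out : List Int) : Decidable (Spec_derangement ls out) := by unfold Spec_derangement; infer_instance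

-- ===== CLAIM (what is proved, stated in full; the proofs are below) =====
def Claim_equal_derangement : Prop := ∀ (ls : List Int), Dom_derangement ls → Pre_derangement ls → Spec_derangement ls (derangement ls)

-- ===== LEMMAS AND PROOFS =====

def pvOk (ls : List Int) (n j : Nat) : Prop :=
  ∀ c : Nat, (c = 2*j+1 ∨ c = 2*j+2) → c < n → ls.getD c 0 ≤ ls.getD j 0

theorem pvGetD_set_self (l : List Int) (m : Nat) (a : Int) (h : m < l.length) :
    (l.set m a).getD m 0 = a := by
  simp [List.getD_eq_getElem?_getD, h]

theorem pvGetD_set_ne (l : List Int) (k m : Nat) (a : Int) (h : m ≠ k) :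
    (l.set k a).getD m 0 = l.getD m 0 := by
  simp [List.getD_eq_getElem?_getD, List.getElem?_set_ne (Ne.symm h)]

theorem pvSet_multiset : ∀ (l : List Int) (k : Nat) (a : Int), k < l.length →
    ((l.set k a : List Int) : Multiset Int) + {l.getD k 0} = (l : Multiset Int) + {a} := by
  intro l
  induction l with
  | nil => intro k a h; simp at h
  | cons x t ih =>
    intro k a h
    cases k with
    | zero =>
      simp only [List.set, List.getD_cons_zero, ← Multiset.cons_coe,
        ← Multiset.singleton_add, ← Multiset.cons_coe]
      abel
    | succ k =>
      simp only [List.set, List.getD_cons_succ]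
      have := ih k a (by simpa using h)
      rw [← Multiset.cons_coe, ← Multiset.cons_coe,
        ← Multiset.singleton_add, ← Multiset.singleton_add,
        add_assoc, add_assoc, this]

theorem pvSwap_perm (l : List Int) (i b : Nat) (hi : i < l.length) (hb : b < l.length)
    (hne : i ≠ b) : ((l.set b (l.getD i 0)).set i (l.getD b 0)).Perm l := by
  rw [← Multiset.coe_eq_coe]
  have h1 := pvSet_multiset (l.set b (l.getD i 0)) i (l.getD b 0) (by simpa using hi)
  have h2 := pvSet_multiset l b (l.getD i 0) hb
  have e : (l.set b (l.getD i 0)).getD i 0 = l.getD i 0 := pvGetD_set_ne _ _ _ _ hne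
  rw [e] at h1
  exact add_right_cancel (h1.trans h2)

def pvH (ls r : List Int) (n i : Nat) : Prop :=
  r.length = ls.length ∧ r.Perm ls ∧
  (∀ m : Nat, m ≠ i → m < 2*i+1 → r.getD m 0 = ls.getD m 0) ∧
  (∀ j : Nat, i ≤ j → pvOk r n j) ∧
  (r.getD i 0 = ls.getD i 0 ∨ (2*i+1 < n ∧ r.getD i 0 = ls.getD (2*i+1) 0) ∨
    (2*i+2 < n ∧ r.getD i 0 = ls.getD (2*i+2) 0))

theorem heapify_base (ls : List Int) (n i : Nat)
    (pre : ∀ j, i < j → pvOk ls n j) (hok : pvOk ls n i) : pvH ls ls n i := by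
  refine ⟨rfl, List.Perm.refl _, fun _ _ _ => rfl, ?_, Or.inl rfl⟩
  intro j hij
  rcases eq_or_lt_of_le hij with rfl | h
  · exact hok
  · exact pre j h

theorem heapify_step (f : Nat) (ls : List Int) (n i b : Nat) (hn : n = ls.length)
    (pre : ∀ j, i < j → pvOk ls n j)
    (hbchild : b = 2*i+1 ∨ b = 2*i+2) (hbn : b < n)
    (hge_i : ls.getD i 0 ≤ ls.getD b 0)
    (hge_l : 2*i+1 < n → ls.getD (2*i+1) 0 ≤ ls.getD b 0)
    (hge_r : 2*i+2 < n → ls.getD (2*i+2) 0 ≤ ls.getD b 0)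
    (IH : ∀ ls', n = ls'.length → (∀ j, b < j → pvOk ls' n j) →
      pvH ls' (heapify f ls' n b) n b) :
    pvH ls (heapify f ((ls.set b (ls.getD i 0)).set i (ls.getD b 0)) n b) n i := by
  have hbi : b ≠ i := by omega
  have hin : i < n := by omega
  set ls' := (ls.set b (ls.getD i 0)).set i (ls.getD b 0) with hls'
  have hlen' : ls'.length = ls.length := by simp [hls']
  have e_i : ls'.getD i 0 = ls.getD b 0 :=
    pvGetD_set_self _ _ _ (by simp; omega)
  have e_b : ls'.getD b 0 = ls.getD i 0 := by
    rw [pvGetD_set_ne _ _ _ _ hbi, pvGetD_set_self _ _ _ (by omega)]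
  have e_other : ∀ m : Nat, m ≠ i → m ≠ b → ls'.getD m 0 = ls.getD m 0 := by
    intro m h1 h2
    rw [pvGetD_set_ne _ _ _ _ h1, pvGetD_set_ne _ _ _ _ h2]
  have pre' : ∀ j, b < j → pvOk ls' n j := by
    intro j hj c hc hcn
    rw [e_other c (by omega) (by omega), e_other j (by omega) (by omega)]
    exact pre j (by omega) c hc hcn
  obtain ⟨L, P, U, OK, HD⟩ := IH ls' (by rw [hn, hlen']) pre'
  have swapP : ls'.Perm ls := pvSwap_perm ls i b (by omega) (by omega) (by omega)
  have r_i : (heapify f ls' n b).getD i 0 = ls.getD b 0 := by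
    rw [U i (by omega) (by omega), e_i]
  refine ⟨L.trans hlen', P.trans swapP, ?_, ?_, ?_⟩
  · intro m hmi hmlt
    have hmb : m ≠ b := by omega
    rw [U m hmb (by omega), e_other m hmi hmb]
  · intro j hij c hc hcn
    rcases Nat.lt_or_ge j b with hjb | hjb
    · rcases eq_or_lt_of_le hij with rfl | hij'
      · -- j = i
        rw [r_i]
        by_cases hcb : c = b
        · subst hcb
          rcases HD with h | ⟨hlt, h⟩ | ⟨hlt, h⟩
          · rw [h, e_b]; exact hge_i
          · rw [h, e_other _ (by omega) (by omega)]
            exact pre c (by omega) _ (Or.inl rfl) hlt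
          · rw [h, e_other _ (by omega) (by omega)]
            exact pre c (by omega) _ (Or.inr rfl) hlt
        · rw [U c hcb (by omega), e_other c (by omega) hcb]
          rcases hc with rfl | rfl
          · exact hge_l hcn
          · exact hge_r hcn
      · -- i < j < b
        have hcb : c ≠ b := by omega
        rw [U c hcb (by omega), e_other c (by omega) hcb,
            U j (by omega) (by omega), e_other j (by omega) (by omega)]
        exact pre j hij' c hc hcn
    · exact OK j hjb c hc hcn
  · rw [r_i]
    rcases hbchild with h | h
    · exact Or.inr (Or.inl ⟨by omega, by rw [h]⟩)
    · exact Or.inr (Or.inr ⟨by omega, by rw [h]⟩)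

theorem heapify_spec : ∀ (d : Nat) (ls : List Int) (n i : Nat), n - i ≤ d →
    n = ls.length → (∀ j, i < j → pvOk ls n j) → pvH ls (heapify d ls n i) n i := by
  intro d
  induction d with
  | zero =>
    intro ls n i hd hn pre
    exact heapify_base ls n i pre (fun c hc hcn => absurd hcn (by omega))
  | succ d IH =>
    intro ls n i hd hn pre
    show pvH ls (heapify (d + 1) ls n i) n i
    rw [heapify]
    split_ifs with h1 h2 h3 h4 h5 h6 h7
    · exact heapify_step d ls n i (2*i+1+1) hn pre (by omega) h2.1
        (le_of_lt (h1.2.trans h2.2)) (fun _ => le_of_lt h2.2) (fun _ => le_refl _)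
        (fun ls' ha hb => IH ls' n (2*i+1+1) (by omega) ha hb)
    · exact (h3 (by omega)).elim
    · exact heapify_step d ls n i (2*i+1) hn pre (by omega) h1.1
        (le_of_lt h1.2) (fun _ => le_refl _)
        (fun hr => not_lt.mp (not_and.mp h2 hr))
        (fun ls' ha hb => IH ls' n (2*i+1) (by omega) ha hb)
    · exact (h4 (by omega)).elim
    · exact heapify_step d ls n i (2*i+1+1) hn pre (by omega) h5.1
        (le_of_lt h5.2)
        (fun hl => (not_lt.mp (not_and.mp h1 hl)).trans (le_of_lt h5.2))
        (fun _ => le_refl _)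
        (fun ls' ha hb => IH ls' n (2*i+1+1) (by omega) ha hb)
    · exact (h6 (by omega)).elim
    · exact (h7 rfl).elim
    · exact heapify_base ls n i pre (fun c hc hcn => by
        rcases hc with rfl | rfl
        · exact not_lt.mp (not_and.mp h1 hcn)
        · exact not_lt.mp (not_and.mp h5 hcn))

def pvDown : List Int → Nat → Nat → List Int
  | ls, _, 0 => ls
  | ls, n, k+1 => pvDown (heapify n ls n k) n k

theorem pvDown_spec : ∀ (k : Nat) (ls : List Int) (n : Nat), n = ls.length →
    (∀ j, k ≤ j → pvOk ls n j) →
    (pvDown ls n k).Perm ls ∧ ∀ j, pvOk (pvDown ls n k) n j := by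
  intro k
  induction k with
  | zero => exact fun ls n hn pre => ⟨List.Perm.refl _, fun j => pre j (Nat.zero_le _)⟩
  | succ k ih =>
    intro ls n hn pre
    obtain ⟨L, P, _, OK, _⟩ :=
      heapify_spec n ls n k (Nat.sub_le _ _) hn (fun j hj => pre j (by omega))
    obtain ⟨P2, OK2⟩ := ih (heapify n ls n k) n (by rw [hn] at L ⊢; omega) (fun j hj => OK j hj)
    exact ⟨P2.trans P, OK2⟩

theorem pvDown_foldl : ∀ (k : Nat) (l : List Int) (n : Nat),
    (PySem.List.pyRange ((k : Int) - 1) (-1) (-1)).foldl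
      (fun a i => heapify n a n i.toNat) l = pvDown l n k := by
  intro k
  induction k with
  | zero =>
    intro l n
    rw [PySem.List.pyRange_neg_one_eq_nil (by norm_num)]
    rfl
  | succ k ih =>
    intro l n
    have : ((k + 1 : Nat) : Int) - 1 = (k : Int) := by push_cast; ring
    rw [this, PySem.List.pyRange_neg_one_cons (by omega)]
    simp only [List.foldl_cons, Int.toNat_natCast]
    exact ih (heapify n l n k) n

theorem maxHeap_eq_pvDown (ls : List Int) :
    maxHeap ls = pvDown ls ls.length (ls.length / 2) := by
  unfold maxHeap
  simp only []
  rw [show PySem.Int.floordiv (ls.length : Int) 2 = ((ls.length / 2 : Nat) : Int) from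
    PySem.Int.floordiv_natCast ls.length 2]
  exact pvDown_foldl (ls.length / 2) ls ls.length

theorem maxHeap_spec (ls : List Int) :
    (maxHeap ls).Perm ls ∧ ∀ j, pvOk (maxHeap ls) ls.length j := by
  rw [maxHeap_eq_pvDown]
  exact pvDown_spec (ls.length / 2) ls ls.length rfl
    (fun j hj c hc hcn => absurd hcn (by omega))

theorem pvRoot_max (ls : List Int) (n : Nat) (hok : ∀ j, pvOk ls n j) :
    ∀ m, m < n → ls.getD m 0 ≤ ls.getD 0 0 := by
  intro m
  induction m using Nat.strong_induction_on with
  | _ m ih =>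
    intro hm
    rcases Nat.eq_zero_or_pos m with rfl | hpos
    · exact le_refl _
    · have hc : m = 2 * ((m-1)/2) + 1 ∨ m = 2 * ((m-1)/2) + 2 := by omega
      exact (hok ((m-1)/2) m hc hm).trans (ih ((m-1)/2) (by omega) (by omega))

theorem maxHeap_perm (ls : List Int) : (maxHeap ls).Perm ls := (maxHeap_spec ls).1

theorem maxHeap_max (ls : List Int) : ∀ x ∈ maxHeap ls, x ≤ (maxHeap ls).getD 0 0 := by
  intro x hx
  obtain ⟨m, hm, rfl⟩ := List.mem_iff_getElem.mp hx
  rw [← List.getD_eq_getElem (maxHeap ls) 0 hm]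
  exact pvRoot_max (maxHeap ls) ls.length (maxHeap_spec ls).2 m
    (by rw [← (maxHeap_perm ls).length_eq]; exact hm)

theorem pvHead_cons (l : List Int) (h : l ≠ []) : l = l.getD 0 0 :: l.drop 1 := by
  cases l with
  | nil => exact absurd rfl h
  | cons a t => rfl

theorem pvPickMax (m : List Int) (v : Int) (D : Multiset Int)
    (hm : (↑m : Multiset Int) = v ::ₘ D) (hmax : ∀ x ∈ D, x ≤ v) :
    (maxHeap m).getD 0 0 = v ∧ (↑((maxHeap m).drop 1) : Multiset Int) = D := by
  have hne : m ≠ [] := by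
    intro h; subst h
    exact absurd hm.symm (Multiset.cons_ne_zero)
  have hmm : (↑(maxHeap m) : Multiset Int) = (↑m : Multiset Int) :=
    Multiset.coe_eq_coe.mpr (maxHeap_perm m)
  have hne2 : maxHeap m ≠ [] := by
    intro h
    rw [h] at hmm
    exact absurd (hmm.trans hm).symm Multiset.cons_ne_zero
  have hcons := pvHead_cons (maxHeap m) hne2
  have hh_mem : (maxHeap m).getD 0 0 ∈ (v ::ₘ D) := by
    rw [← hm, ← hmm]
    exact Multiset.mem_coe.mpr (hcons ▸ List.mem_cons_self)
  have hv_mem : v ∈ maxHeap m := by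
    rw [← Multiset.mem_coe, hmm, hm]
    exact Multiset.mem_cons_self v D
  have h1 : v ≤ (maxHeap m).getD 0 0 := maxHeap_max m v hv_mem
  have h2 : (maxHeap m).getD 0 0 ≤ v := by
    rcases Multiset.mem_cons.mp hh_mem with h | h
    · exact le_of_eq h
    · exact hmax _ h
  have hv : (maxHeap m).getD 0 0 = v := le_antisymm h2 h1
  refine ⟨hv, ?_⟩
  have : (↑(maxHeap m) : Multiset Int) = v ::ₘ ↑((maxHeap m).drop 1) := by
    conv_lhs => rw [hcons]
    rw [hv]
    rfl
  rw [this, hm] at hmm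
  exact ((Multiset.cons_inj_right v).mp hmm)

theorem pvSorted_getD_le (s : List Int) (hp : s.Pairwise (fun a b => b ≤ a))
    (p q : Nat) (hpq : p ≤ q) (hq : q < s.length) : s.getD q 0 ≤ s.getD p 0 := by
  rcases eq_or_lt_of_le hpq with rfl | h
  · exact le_refl _
  · rw [List.getD_eq_getElem s 0 hq, List.getD_eq_getElem s 0 (by omega)]
    exact List.pairwise_iff_getElem.mp hp p q (by omega) hq h

theorem pvDrop_le (s : List Int) (hp : s.Pairwise (fun a b => b ≤ a))
    (j m : Nat) (_hj : j < s.length) (hjm : j ≤ m) :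
    ∀ x ∈ s.drop m, x ≤ s.getD j 0 := by
  intro x hx
  obtain ⟨q, hq, rfl⟩ := List.mem_iff_getElem.mp hx
  rw [List.getElem_drop]
  rw [← List.getD_eq_getElem s 0 (by simp at hq; omega)]
  exact pvSorted_getD_le s hp j (m + q) (by omega) (by simp at hq; omega)

theorem pvDrop_cons (s : List Int) (m : Nat) (hm : m < s.length) :
    s.drop m = s.getD m 0 :: s.drop (m + 1) := by
  rw [List.getD_eq_getElem s 0 hm]
  exact (List.drop_eq_getElem_cons hm)

theorem pvCopy : ∀ (l acc : List Int), l.foldl (fun a x => a ++ [x]) acc = acc ++ l := by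
  intro l
  induction l with
  | nil => simp
  | cons x t ih => intro acc; simp [ih]

theorem pvLoop (ls s : List Int) (n : Nat) (hn : n = ls.length)
    (hsp : s.Perm ls) (hpair : s.Pairwise (fun a b => b ≤ a)) :
    ∀ i, i ≤ n →
      (((List.range i).foldl (derangeStepA ls n) ([], ls)).1 =
        ((List.range i).foldl (derangeStepB ls s n) ([], 0, 1)).1) ∧
      ((List.range i).foldl (derangeStepA ls n) ([], ls)).1.length = i ∧
      ((List.range i).foldl (derangeStepB ls s n) ([], 0, 1)).2.2 = i + 1 ∧
      (i < n → ((List.range i).foldl (derangeStepB ls s n) ([], 0, 1)).2.1 ≤ i ∧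
        (↑(((List.range i).foldl (derangeStepA ls n) ([], ls)).2) : Multiset Int) =
          s.getD (((List.range i).foldl (derangeStepB ls s n) ([], 0, 1)).2.1) 0 ::ₘ
            ↑(s.drop (i + 1))) := by
  have hslen : s.length = n := by rw [hsp.length_eq, hn]
  intro i
  induction i with
  | zero =>
    intro _
    refine ⟨rfl, rfl, rfl, fun h0 => ⟨le_refl _, ?_⟩⟩
    have hsne : s ≠ [] := by
      intro h; rw [h] at hslen; simp at hslen; omega
    calc (↑ls : Multiset Int) = ↑s := (Multiset.coe_eq_coe.mpr hsp).symm
      _ = ↑(s.getD 0 0 :: s.drop 1) := by rw [← pvHead_cons s hsne]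
      _ = s.getD 0 0 ::ₘ ↑(s.drop 1) := by rfl
  | succ i IH =>
    intro hi1
    have hi : i < n := by omega
    obtain ⟨hseq, hlen, hk, hrest⟩ := IH (le_of_lt hi)
    obtain ⟨hj, hmulti⟩ := hrest hi
    set RA := (List.range i).foldl (derangeStepA ls n) ([], ls) with hRA
    set RB := (List.range i).foldl (derangeStepB ls s n) ([], 0, 1) with hRB
    have hjlt : RB.2.1 < s.length := by omega
    have hmax : ∀ x ∈ (↑(s.drop (i + 1)) : Multiset Int), x ≤ s.getD RB.2.1 0 :=
      fun x hx => pvDrop_le s hpair RB.2.1 (i + 1) hjlt (by omega) x (Multiset.mem_coe.mp hx)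
    obtain ⟨hd, hdrop⟩ := pvPickMax RA.2 (s.getD RB.2.1 0) _ hmulti hmax
    simp only [List.range_succ, List.foldl_append, List.foldl_cons, List.foldl_nil, ← hRA, ← hRB]
    simp only [derangeStepA, derangeStepB]
    rw [hd]
    by_cases hcond : i = n - 1 ∨ s.getD RB.2.1 0 ≠ ls.getD i 0
    · rw [if_pos hcond, if_pos hcond]
      dsimp only
      have e12 : i + 1 + 1 = i + 2 := by omega
      refine ⟨by rw [hseq], by simp [hlen], by simp [hk], fun h1 => ⟨by omega, ?_⟩⟩
      simp only [hdrop, hk, e12]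
      rw [pvDrop_cons s (i + 1) (by omega)]
      rfl
    · rw [if_neg hcond, if_neg hcond]
      push Not at hcond
      have hi2 : i + 1 < n := by omega
      have ht2 : (↑((maxHeap RA.2).drop 1) : Multiset Int) =
          s.getD (i + 1) 0 ::ₘ ↑(s.drop (i + 2)) := by
        rw [hdrop, pvDrop_cons s (i + 1) (by omega)]
        rfl
      have hmax2 : ∀ x ∈ (↑(s.drop (i + 2)) : Multiset Int), x ≤ s.getD (i + 1) 0 :=
        fun x hx => pvDrop_le s hpair (i + 1) (i + 2) (by omega) (by omega) x
          (Multiset.mem_coe.mp hx)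
      obtain ⟨hd2, hdrop2⟩ := pvPickMax ((maxHeap RA.2).drop 1) (s.getD (i + 1) 0) _ ht2 hmax2
      dsimp only
      have e12 : i + 1 + 1 = i + 2 := by omega
      refine ⟨by rw [hd2, hseq, hk], by simp [hlen], by simp [hk], fun h1 => ⟨by omega, ?_⟩⟩
      rw [e12, ← Multiset.coe_add, hdrop2, Multiset.coe_singleton, add_comm,
        Multiset.singleton_add]

theorem pvMain (ls : List Int) (hne : ls ≠ []) : derangement ls = derangement_alt ls := by
  have hn : 0 < ls.length := List.length_pos_iff.mpr hne
  have hsp : (PySem.List.sorted ls (fun x => x) true).Perm ls := PySem.List.sorted_perm ls (fun x => x) true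
  have hpair : (PySem.List.sorted ls (fun x => x) true).Pairwise (fun a b => b ≤ a) := by
    have := PySem.List.sorted_pairwise_rev (xs := ls) (key := fun x => x)
    simpa using this
  obtain ⟨hseq, hlen, -⟩ :=
    pvLoop ls (PySem.List.sorted ls (fun x => x) true) ls.length rfl hsp hpair
      ls.length (le_refl _)
  unfold derangement derangement_alt
  simp only [pvCopy ls [], List.nil_append]
  rw [hseq]
  set q := ((List.range ls.length).foldl
    (derangeStepB ls (PySem.List.sorted ls (fun x => x) true) ls.length) ([], 0, 1)).1 with hq
  rw [hseq] at hlen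
  rcases Nat.lt_or_ge 1 ls.length with h2 | h1
  · by_cases hc : ls.getD (ls.length - 1) 0 = q.getD (ls.length - 1) 0
    · rw [if_pos hc, if_pos ⟨h2, hc⟩]
    · rw [if_neg hc, if_neg (by rintro ⟨-, h⟩; exact hc h)]
  · have h1' : ls.length = 1 := by omega
    obtain ⟨a, ha⟩ := List.length_eq_one_iff.mp (by rw [hlen, h1'])
    rw [ha, h1']
    norm_num

-- ===== VERDICT (by name: the statement is the Claim_ definition above) =====
theorem derangement_spec : Claim_equal_derangement := by
  intro ls _ hpre
  unfold Spec_derangement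
  exact pvMain ls hpre
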